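-- pv_equiv track=rewrite | github.com/ezz2003/homework_python | lesson2/classroom_work/problem_11.py | sequence_number_fibonacci
-- ===== SOURCE A (Python) =====
-- def sequence_number_fibonacci(num):
--     pre_v = 0
--     nex_t = 1
--     i = 3
--     while nex_t < num:
--         nex_t, pre_v = pre_v + nex_t, nex_t
--         if nex_t == num:
--             return i
--         i += 1
--     return -1
-- ===== SOURCE B (Python) =====
-- def _fib(n):
--     # fast doubling: returns (F(n), F(n+1)) with F(0)=0, F(1)=1
--     if n == 0:
--         return (0, 1)
--     a, b = _fib(n // 2)
--     c = a * (2 * b - a)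
--     d = a * a + b * b
--     if n % 2 == 1:
--         return (d, c + d)
--     return (c, d)
--
-- def sequence_number_fibonacci(num):
--     if num < 2:
--         return -1
--     # find the smallest k >= 3 with F(k) >= num: exponential then binary search
--     lo, hi = 3, 4
--     while _fib(hi)[0] < num:
--         lo, hi = hi, 2 * hi
--     while lo < hi:
--         mid = (lo + hi) // 2
--         if _fib(mid)[0] < num:
--             lo = mid + 1
--         else:
--             hi = mid
--     return lo + 1 if _fib(lo)[0] == num else -1
-- ===== Notes on version B (the rewrite author's own statement) =====
-- stated objective: alternative
-- what changed: Replaces A's linear generation of Fibonacci numbers (one addition per term until reaching num) with a fast-doubling Fibonacci function combined with an exponential-then-binary search for the smallest index whose Fibonacci value reaches num.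
import Mathlib
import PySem

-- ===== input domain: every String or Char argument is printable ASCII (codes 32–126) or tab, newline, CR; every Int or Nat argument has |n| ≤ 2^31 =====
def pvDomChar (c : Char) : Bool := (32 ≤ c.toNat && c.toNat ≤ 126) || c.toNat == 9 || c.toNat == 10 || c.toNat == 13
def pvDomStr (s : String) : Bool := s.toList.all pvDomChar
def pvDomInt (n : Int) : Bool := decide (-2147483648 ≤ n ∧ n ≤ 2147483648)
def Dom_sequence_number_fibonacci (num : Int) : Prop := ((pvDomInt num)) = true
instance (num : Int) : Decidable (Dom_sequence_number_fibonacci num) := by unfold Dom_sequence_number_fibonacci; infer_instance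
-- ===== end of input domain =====

-- B replaces A's linear Fibonacci generation by a fast-doubling Fibonacci function plus an
-- exponential-then-binary search for the index (an alternative algorithm; not claimed faster).

-- ===== PORT A =====
-- A's while-loop as structural recursion; the three Prop arguments are the loop invariants
-- (0 ≤ pre_v, 1 ≤ nex_t, pre_v ≤ nex_t) that A's initial state satisfies; they only serve termination.
def goA (num pre nex i : Int) (hp : 0 ≤ pre) (hn : 1 ≤ nex) (hpn : pre ≤ nex) : Int :=
  if nex < num then
    if pre + nex = num then i
    else goA num nex (pre + nex) (i + 1) (by omega) (by omega) (by omega)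
  else -1
termination_by (2 * num - pre - nex).toNat
decreasing_by omega

def sequence_number_fibonacci (num : Int) : Int :=
  goA num 0 1 3 (by omega) (by omega) (by omega)

-- ===== PORT B =====
-- lemmas cited by the ports' termination proofs
theorem nat_le_fib_add_two (n : Nat) : n ≤ Nat.fib n + 2 := by
  rcases Nat.lt_or_ge n 5 with h | h
  · interval_cases n <;> decide
  · have := Nat.le_fib_self h
    omega

-- _fib from Source B (fast doubling); n is a nonnegative Python int, represented as Nat
def fibFD (n : Nat) : Int × Int :=
  if n = 0 then (0, 1)
  else
    let p := fibFD (n / 2)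
    let a := p.1
    let b := p.2
    let c := a * (2 * b - a)
    let d := a * a + b * b
    if n % 2 = 1 then (d, c + d) else (c, d)
decreasing_by omega

theorem fibFD_eq (n : Nat) : fibFD n = ((Nat.fib n : Int), (Nat.fib (n + 1) : Int)) := by
  induction n using Nat.strong_induction_on with
  | _ n ih =>
    rw [fibFD]
    by_cases h : n = 0
    · simp [h]
    · have ihm := ih (n / 2) (by omega)
      simp only [h, if_false, ihm]
      have hle : (Nat.fib (n / 2) : Int) ≤ 2 * (Nat.fib (n / 2 + 1) : Int) := by
        have h1 : Nat.fib (n / 2) ≤ Nat.fib (n / 2 + 1) := Nat.fib_le_fib_succ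
        exact_mod_cast by omega
      have hc : ((Nat.fib (2 * (n / 2)) : Nat) : Int) =
          (Nat.fib (n / 2) : Int) * (2 * (Nat.fib (n / 2 + 1) : Int) - (Nat.fib (n / 2) : Int)) := by
        have h1 : Nat.fib (n / 2) ≤ 2 * Nat.fib (n / 2 + 1) := by exact_mod_cast hle
        rw [Nat.fib_two_mul, Nat.cast_mul, Nat.cast_sub h1]
        push_cast; ring
      have hd : ((Nat.fib (2 * (n / 2) + 1) : Nat) : Int) =
          (Nat.fib (n / 2) : Int) * (Nat.fib (n / 2)) + (Nat.fib (n / 2 + 1) : Int) * (Nat.fib (n / 2 + 1)) := by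
        rw [Nat.fib_two_mul_add_one]; push_cast; ring
      rcases Nat.even_or_odd n with he | ho
      · have hn2 : 2 * (n / 2) = n := by
          rcases he with ⟨r, hr⟩; omega
        have hc' := hc; have hd' := hd
        rw [hn2] at hc'
        rw [show 2 * (n / 2) + 1 = n + 1 by omega] at hd'
        simp only [show ¬ (n % 2 = 1) by omega, if_false, Prod.mk.injEq]
        exact ⟨hc'.symm, hd'.symm⟩
      · have hn2 : 2 * (n / 2) + 1 = n := by
          rcases ho with ⟨r, hr⟩; omega
        have hd' := hd
        rw [hn2] at hd'
        simp only [show n % 2 = 1 by omega, if_true, Prod.mk.injEq]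
        refine ⟨hd'.symm, ?_⟩
        have hn3 : n + 1 = 2 * (n / 2) + 2 := by omega
        rw [hn3, Nat.fib_add_two, Nat.cast_add, hc, hd]

theorem fibFD_fst_ge (n : Nat) : (n : Int) ≤ (fibFD n).1 + 2 := by
  rw [fibFD_eq]
  have h := nat_le_fib_add_two n
  show (n : Int) ≤ (Nat.fib n : Int) + 2
  exact_mod_cast h

-- Source B's first while-loop (exponential search); h1 is the invariant 1 ≤ hi, for termination only
def expSearch (num lo hi : Int) (h1 : 1 ≤ hi) : Int × Int :=
  if (fibFD hi.toNat).1 < num then expSearch num hi (2 * hi) (by omega)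
  else (lo, hi)
termination_by (num + 2 - hi).toNat
decreasing_by
  have hge := fibFD_fst_ge hi.toNat
  have hcast : ((hi.toNat : Int)) = hi := Int.toNat_of_nonneg (by omega)
  omega

-- Source B's second while-loop (binary search)
def binSearch (num lo hi : Int) : Int :=
  if h : lo < hi then
    let mid := PySem.Int.floordiv (lo + hi) 2
    if (fibFD mid.toNat).1 < num then binSearch num (mid + 1) hi
    else binSearch num lo mid
  else lo
termination_by (hi - lo).toNat
decreasing_by
  all_goals
    rw [PySem.Int.floordiv_eq_ediv_of_pos (by omega)] at *
    omega

theorem pv_one_le_four : (1 : Int) ≤ 4 := by omega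

def sequence_number_fibonacci_alt (num : Int) : Int :=
  if num < 2 then -1
  else
    let p := expSearch num 3 4 pv_one_le_four
    let lo := binSearch num p.1 p.2
    if (fibFD lo.toNat).1 = num then lo + 1 else -1

-- ===== PRECONDITION & SPEC =====
def Spec_sequence_number_fibonacci (num : Int) (out : Int) : Prop := out = sequence_number_fibonacci_alt num
instance (num : Int) (out : Int) : Decidable (Spec_sequence_number_fibonacci num out) := by unfold Spec_sequence_number_fibonacci; infer_instance

-- ===== CLAIM (what is proved, stated in full; the proofs are below) =====
def Claim_equal_sequence_number_fibonacci : Prop := ∀ (num : Int), Dom_sequence_number_fibonacci num → Spec_sequence_number_fibonacci num (sequence_number_fibonacci num)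

-- ===== LEMMAS AND PROOFS =====
theorem exists_fib_ge (num : Int) : ∃ k : Nat, num ≤ (Nat.fib k : Int) := by
  refine ⟨num.toNat + 2, ?_⟩
  have h := nat_le_fib_add_two (num.toNat + 2)
  have : (num.toNat : Int) ≤ (Nat.fib (num.toNat + 2) : Int) := by exact_mod_cast by omega
  omega

-- the least index K with num ≤ fib K
def Kf (num : Int) : Nat := Nat.find (exists_fib_ge num)

theorem Kf_spec (num : Int) : num ≤ (Nat.fib (Kf num) : Int) := Nat.find_spec (exists_fib_ge num)

theorem Kf_eq (num : Int) (k : Nat) (h1 : num ≤ (Nat.fib k : Int))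
    (h2 : ∀ m : Nat, m < k → (Nat.fib m : Int) < num) : Kf num = k := by
  have hub : Kf num ≤ k := Nat.find_le h1
  rcases Nat.lt_or_ge (Kf num) k with hlt | hge
  · have := h2 _ hlt
    have := Kf_spec num
    omega
  · omega

-- the common value both programs compute for num ≥ 2
theorem goA_spec (num : Int) (h2 : 2 ≤ num) :
    ∀ n : Nat, ∀ (pre nex i : Int) (hp : 0 ≤ pre) (hn : 1 ≤ nex) (hpn : pre ≤ nex),
      (2 * num - pre - nex).toNat ≤ n →
      (∃ j : Nat, pre = (Nat.fib j : Int) ∧ nex = (Nat.fib (j + 1) : Int) ∧ i = (j : Int) + 3 ∧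
        (∀ m : Nat, m ≤ j → (Nat.fib m : Int) < num) ∧ (Nat.fib (j + 1) : Int) ≠ num) →
      goA num pre nex i hp hn hpn =
        (if (Nat.fib (Kf num) : Int) = num then ((Kf num : Int) + 1) else -1) := by
  intro n
  induction n with
  | zero =>
    rintro pre nex i hp hn hpn hmeas ⟨j, hpre, hnex, hi, hlt, hne⟩
    have hg : ¬ nex < num := by omega
    rw [goA, if_neg hg]
    have hK : Kf num = j + 1 := by
      refine Kf_eq num (j + 1) (by omega) ?_
      intro m hm
      exact hlt m (by omega)
    rw [hK, if_neg (by omega)]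
  | succ n ih =>
    rintro pre nex i hp hn hpn hmeas ⟨j, hpre, hnex, hi, hlt, hne⟩
    have hadd : (Nat.fib (j + 2) : Int) = (Nat.fib j : Int) + (Nat.fib (j + 1) : Int) := by
      rw [Nat.fib_add_two]; push_cast; ring
    rw [goA]
    by_cases hg : nex < num
    · rw [if_pos hg]
      by_cases hq : pre + nex = num
      · rw [if_pos hq]
        have hK : Kf num = j + 2 := by
          refine Kf_eq num (j + 2) (by rw [hadd]; omega) ?_
          intro m hm
          rcases Nat.lt_or_ge m (j + 1) with hm' | hm'
          · exact hlt m (by omega)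
          · have : m = j + 1 := by omega
            subst this; omega
        rw [hK, if_pos (by rw [hadd]; omega)]
        push_cast
        omega
      · rw [if_neg hq]
        refine ih nex (pre + nex) (i + 1) (by omega) (by omega) (by omega) (by omega) ?_
        refine ⟨j + 1, by omega, by rw [hpre, hnex, ← hadd], by push_cast; omega, ?_, ?_⟩
        · intro m hm
          rcases Nat.lt_or_ge m (j + 1) with hm' | hm'
          · exact hlt m (by omega)
          · have : m = j + 1 := by omega
            subst this; omega
        · rw [show j + 1 + 1 = j + 2 from rfl, hadd]
          omega
    · rw [if_neg hg]
      have hK : Kf num = j + 1 := by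
        refine Kf_eq num (j + 1) (by omega) ?_
        intro m hm
        exact hlt m (by omega)
      rw [hK, if_neg (by omega)]

theorem expSearch_spec (num : Int) (h2 : 2 ≤ num) :
    ∀ n : Nat, ∀ (lo hi : Int) (h1 : 1 ≤ hi),
      (num + 2 - hi).toNat ≤ n → 3 ≤ lo → lo ≤ hi →
      (∀ m : Nat, (m : Int) < lo → (Nat.fib m : Int) < num) →
      3 ≤ (expSearch num lo hi h1).1 ∧ (expSearch num lo hi h1).1 ≤ (expSearch num lo hi h1).2 ∧
        (∀ m : Nat, (m : Int) < (expSearch num lo hi h1).1 → (Nat.fib m : Int) < num) ∧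
        num ≤ (Nat.fib (expSearch num lo hi h1).2.toNat : Int) := by
  intro n
  induction n with
  | zero =>
    intro lo hi h1 hmeas hlo3 hlohi hbelow
    have hge := fibFD_fst_ge hi.toNat
    have hcast : ((hi.toNat : Int)) = hi := Int.toNat_of_nonneg (by omega)
    have hg : ¬ (fibFD hi.toNat).1 < num := by omega
    rw [expSearch, if_neg hg]
    rw [fibFD_eq] at hg
    exact ⟨hlo3, hlohi, hbelow, by show num ≤ (Nat.fib hi.toNat : Int); omega⟩
  | succ n ih =>
    intro lo hi h1 hmeas hlo3 hlohi hbelow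
    rw [expSearch]
    by_cases hg : (fibFD hi.toNat).1 < num
    · rw [if_pos hg]
      have hge := fibFD_fst_ge hi.toNat
      have hcast : ((hi.toNat : Int)) = hi := Int.toNat_of_nonneg (by omega)
      refine ih hi (2 * hi) (by omega) (by omega) (by omega) (by omega) ?_
      intro m hm
      have hmn : m ≤ hi.toNat := by omega
      have := Nat.fib_mono hmn
      rw [fibFD_eq] at hg
      have : (Nat.fib m : Int) ≤ (Nat.fib hi.toNat : Int) := by exact_mod_cast this
      omega
    · rw [if_neg hg]
      rw [fibFD_eq] at hg
      exact ⟨hlo3, hlohi, hbelow, by show num ≤ (Nat.fib hi.toNat : Int); omega⟩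

theorem binSearch_spec (num : Int) :
    ∀ n : Nat, ∀ (lo hi : Int),
      (hi - lo).toNat ≤ n → 0 ≤ lo → lo ≤ hi →
      (∀ m : Nat, (m : Int) < lo → (Nat.fib m : Int) < num) →
      num ≤ (Nat.fib hi.toNat : Int) →
      binSearch num lo hi = (Kf num : Int) := by
  intro n
  induction n with
  | zero =>
    intro lo hi hmeas hlo0 hlohi hbelow hge
    have heq : lo = hi := by omega
    rw [binSearch, dif_neg (by omega)]
    have hK : Kf num = lo.toNat := by
      refine Kf_eq num lo.toNat (by rw [heq]; exact hge) ?_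
      intro m hm
      exact hbelow m (by omega)
    rw [hK, Int.toNat_of_nonneg hlo0]
  | succ n ih =>
    intro lo hi hmeas hlo0 hlohi hbelow hge
    rw [binSearch]
    by_cases h : lo < hi
    · rw [dif_pos h]
      have hm : PySem.Int.floordiv (lo + hi) 2 = (lo + hi) / 2 :=
        PySem.Int.floordiv_eq_ediv_of_pos (by omega)
      simp only [hm]
      have hb1 : lo ≤ (lo + hi) / 2 := by omega
      have hb2 : (lo + hi) / 2 < hi := by omega
      by_cases hg : (fibFD ((lo + hi) / 2).toNat).1 < num
      · rw [if_pos hg]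
        refine ih ((lo + hi) / 2 + 1) hi (by omega) (by omega) (by omega) ?_ hge
        intro m hmm
        rw [fibFD_eq] at hg
        have hmn : m ≤ ((lo + hi) / 2).toNat := by omega
        have := Nat.fib_mono hmn
        have : (Nat.fib m : Int) ≤ (Nat.fib ((lo + hi) / 2).toNat : Int) := by exact_mod_cast this
        omega
      · rw [if_neg hg]
        rw [fibFD_eq] at hg
        exact ih lo ((lo + hi) / 2) (by omega) (by omega) (by omega) hbelow (by omega)
    · rw [dif_neg h]
      have heq : lo = hi := by omega
      have hK : Kf num = lo.toNat := by
        refine Kf_eq num lo.toNat (by rw [heq]; exact hge) ?_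
        intro m hm
        exact hbelow m (by omega)
      rw [hK, Int.toNat_of_nonneg hlo0]

-- ===== VERDICT (by name: the statement is the Claim_ definition above) =====
theorem fib_small_below (num : Int) (h2 : 2 ≤ num) :
    ∀ m : Nat, (m : Int) < 3 → (Nat.fib m : Int) < num := by
  intro m hm
  have : m ≤ 2 := by omega
  interval_cases m <;> simp [Nat.fib] <;> omega

theorem sequence_number_fibonacci_spec : Claim_equal_sequence_number_fibonacci := by
  intro num _
  unfold Spec_sequence_number_fibonacci
  by_cases hlt : num < 2
  · rw [sequence_number_fibonacci, goA, if_neg (by omega),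
      sequence_number_fibonacci_alt, if_pos hlt]
  · have h2 : 2 ≤ num := by omega
    have hA : sequence_number_fibonacci num =
        (if (Nat.fib (Kf num) : Int) = num then ((Kf num : Int) + 1) else -1) := by
      rw [sequence_number_fibonacci]
      refine goA_spec num h2 (2 * num).toNat 0 1 3 (by omega) (by omega) (by omega) (by omega) ?_
      refine ⟨0, by simp, by simp, by simp, ?_, by simp; omega⟩
      intro m hm
      have : m = 0 := by omega
      subst this
      simp
      omega
    have hexp := expSearch_spec num h2 (num + 2).toNat 3 4 pv_one_le_four
      (by omega) (by omega) (by omega) (fib_small_below num h2)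
    have hbin := binSearch_spec num
      ((expSearch num 3 4 pv_one_le_four).2 - (expSearch num 3 4 pv_one_le_four).1).toNat
      (expSearch num 3 4 pv_one_le_four).1 (expSearch num 3 4 pv_one_le_four).2
      (by omega) (by omega) hexp.2.1 hexp.2.2.1 hexp.2.2.2
    rw [hA]
    simp only [sequence_number_fibonacci_alt, if_neg hlt, hbin, fibFD_eq, Int.toNat_natCast]
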